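-- pv_equiv track=rewrite | github.com/gprash77/ai-news-summary | src/summarizer.py | _select_balanced_items
-- ===== SOURCE A (Python) =====
-- def _select_balanced_items(items: list[dict], youtube_count: int = 2, newsletter_count: int = 3, rss_count: int = 1) -> list[dict]:
--     """Select items balanced across source types: 2 YouTube, 3 newsletter, 1 RSS."""
--     by_type = {}
--     for item in items:
--         source_type = item.get('source_type', 'other')
--         if source_type not in by_type:
--             by_type[source_type] = []
--         by_type[source_type].append(item)
--
--     selected = []
--     # Add items in specific order with specific counts
--     if 'youtube' in by_type:
--         selected.extend(by_type['youtube'][:youtube_count])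
--     if 'newsletter' in by_type:
--         selected.extend(by_type['newsletter'][:newsletter_count])
--     if 'rss' in by_type:
--         selected.extend(by_type['rss'][:rss_count])
--     if 'twitter' in by_type:
--         selected.extend(by_type['twitter'][:1])
--
--     return selected
-- ===== SOURCE B (Python) =====
-- def _select_balanced_items(items: list[dict], youtube_count: int = 2, newsletter_count: int = 3, rss_count: int = 1) -> list[dict]:
--     """Select items balanced across source types, data-driven by a (type, cap) config."""
--     config = [('youtube', youtube_count), ('newsletter', newsletter_count), ('rss', rss_count), ('twitter', 1)]
--     selected = []
--     for source_type, count in config: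
--         selected += [i for i in items if i.get('source_type', 'other') == source_type][:count]
--     return selected
-- ===== Notes on version B (the rewrite author's own statement) =====
-- stated objective: idiomatic
-- what changed: Replaces the grouping dict plus four hand-written if/extend blocks with a data-driven loop over a (source_type, cap) config list, filtering items per type and slicing.
import Mathlib
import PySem

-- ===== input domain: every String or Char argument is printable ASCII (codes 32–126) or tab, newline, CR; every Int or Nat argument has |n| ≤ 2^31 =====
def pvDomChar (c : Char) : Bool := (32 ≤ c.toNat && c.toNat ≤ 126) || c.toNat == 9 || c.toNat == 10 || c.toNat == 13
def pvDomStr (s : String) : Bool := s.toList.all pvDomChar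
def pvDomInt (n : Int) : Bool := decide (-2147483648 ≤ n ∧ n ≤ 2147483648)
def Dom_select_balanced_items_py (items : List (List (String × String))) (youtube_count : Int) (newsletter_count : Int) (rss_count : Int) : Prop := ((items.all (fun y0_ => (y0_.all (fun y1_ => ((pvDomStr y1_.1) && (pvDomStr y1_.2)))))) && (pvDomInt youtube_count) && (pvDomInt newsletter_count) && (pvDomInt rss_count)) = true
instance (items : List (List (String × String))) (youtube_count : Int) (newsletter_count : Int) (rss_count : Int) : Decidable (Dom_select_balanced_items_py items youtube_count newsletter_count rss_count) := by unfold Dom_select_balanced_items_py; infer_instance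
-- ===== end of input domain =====

-- B (idiomatic): replaces A's grouping dict + four hand-written if/extend blocks with one data-driven
-- loop over a (source_type, cap) config list, filtering items per type and slicing; same output.

-- ===== PORT A =====
-- item.get('source_type', 'other'): Python dict lookup (last value for a duplicated key)
def pvGetType (item : List (String × String)) : String :=
  (PySem.Dict.ofList item).getD "source_type" "other"

def select_balanced_items_py (items : List (List (String × String))) (youtube_count : Int) (newsletter_count : Int) (rss_count : Int) : List (List (String × String)) :=
  let by_type : PySem.Dict String (List (List (String × String))) :=
    items.foldl (fun d item =>
      let source_type := pvGetType item
      let d := if d.contains source_type then d else d.insert source_type []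
      d.modify source_type [] (fun l => l ++ [item])) PySem.Dict.empty
  let selected : List (List (String × String)) := []
  let selected := if by_type.contains "youtube" then
      selected ++ PySem.List.slice (by_type.getD "youtube" []) none (some youtube_count) else selected
  let selected := if by_type.contains "newsletter" then
      selected ++ PySem.List.slice (by_type.getD "newsletter" []) none (some newsletter_count) else selected
  let selected := if by_type.contains "rss" then
      selected ++ PySem.List.slice (by_type.getD "rss" []) none (some rss_count) else selected
  let selected := if by_type.contains "twitter" then
      selected ++ PySem.List.slice (by_type.getD "twitter" []) none (some 1) else selected
  selected

-- ===== PORT B =====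
def select_balanced_items_py_alt (items : List (List (String × String))) (youtube_count : Int) (newsletter_count : Int) (rss_count : Int) : List (List (String × String)) :=
  let config : List (String × Int) :=
    [("youtube", youtube_count), ("newsletter", newsletter_count), ("rss", rss_count), ("twitter", 1)]
  config.foldl (fun selected tc =>
    selected ++ PySem.List.slice (items.filter (fun i => pvGetType i == tc.1)) none (some tc.2)) []

-- ===== PRECONDITION & SPEC =====
def Spec_select_balanced_items_py (items : List (List (String × String))) (youtube_count : Int) (newsletter_count : Int) (rss_count : Int) (out : List (List (String × String))) : Prop := out = select_balanced_items_py_alt items youtube_count newsletter_count rss_count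
instance (items : List (List (String × String))) (youtube_count : Int) (newsletter_count : Int) (rss_count : Int) (out : List (List (String × String))) : Decidable (Spec_select_balanced_items_py items youtube_count newsletter_count rss_count out) := by unfold Spec_select_balanced_items_py; infer_instance

-- ===== CLAIM (what is proved, stated in full; the proofs are below) =====
def Claim_equal_select_balanced_items_py : Prop := ∀ (items : List (List (String × String))) (youtube_count : Int) (newsletter_count : Int) (rss_count : Int), Dom_select_balanced_items_py items youtube_count newsletter_count rss_count → Spec_select_balanced_items_py items youtube_count newsletter_count rss_count (select_balanced_items_py items youtube_count newsletter_count rss_count)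

-- ===== LEMMAS AND PROOFS =====

-- one grouping step leaves getD at t as "append item iff its type is t"
theorem pv_step_getD (d : PySem.Dict String (List (List (String × String)))) (item : List (String × String)) (t : String) :
    ((if d.contains (pvGetType item) then d else d.insert (pvGetType item) []).modify (pvGetType item) [] (fun l => l ++ [item])).getD t []
      = (if pvGetType item == t then d.getD t [] ++ [item] else d.getD t []) := by
  by_cases ht : pvGetType item = t
  · subst ht
    rw [if_pos (beq_self_eq_true _), PySem.Dict.getD_modify, if_pos rfl]
    by_cases hc : d.contains (pvGetType item)
    · rw [if_pos hc]
    · rw [if_neg hc, PySem.Dict.getD_insert, if_pos rfl,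
        PySem.Dict.getD_of_not_contains d [] (by simpa using hc)]
  · have hne : t ≠ pvGetType item := fun h => ht h.symm
    have hbeq : (pvGetType item == t) = false := by simpa using ht
    rw [hbeq]
    simp only [Bool.false_eq_true, if_false]
    rw [PySem.Dict.getD_modify, if_neg hne]
    by_cases hc : d.contains (pvGetType item)
    · rw [if_pos hc]
    · rw [if_neg hc, PySem.Dict.getD_insert, if_neg hne]

-- the grouped dict entry at t is the in-order filter of items whose type is t
theorem pv_fold_getD (items : List (List (String × String))) (d : PySem.Dict String (List (List (String × String)))) (t : String) :
    ((items.foldl (fun d item =>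
        let source_type := pvGetType item
        let d := if d.contains source_type then d else d.insert source_type []
        d.modify source_type [] (fun l => l ++ [item])) d).getD t [])
      = d.getD t [] ++ items.filter (fun i => pvGetType i == t) := by
  induction items generalizing d with
  | nil => simp
  | cons x xs ih =>
    simp only [List.foldl_cons, List.filter_cons]
    rw [ih]
    rw [pv_step_getD]
    by_cases h : pvGetType x == t
    · simp [h]
    · simp at h
      simp [h]

-- an entry that never appears as a type is absent, hence the filter is empty
theorem pv_getD_eq_filter (items : List (List (String × String))) (t : String) :
    ((items.foldl (fun d item =>
        let source_type := pvGetType item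
        let d := if d.contains source_type then d else d.insert source_type []
        d.modify source_type [] (fun l => l ++ [item])) (PySem.Dict.empty : PySem.Dict String (List (List (String × String))))).getD t [])
      = items.filter (fun i => pvGetType i == t) := by
  rw [pv_fold_getD]; simp

theorem pv_not_contains_filter (items : List (List (String × String))) (t : String)
    (h : ((items.foldl (fun d item =>
        let source_type := pvGetType item
        let d := if d.contains source_type then d else d.insert source_type []
        d.modify source_type [] (fun l => l ++ [item])) (PySem.Dict.empty : PySem.Dict String (List (List (String × String))))).contains t) = false) :
    items.filter (fun i => pvGetType i == t) = [] := by
  rw [← pv_getD_eq_filter]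
  exact PySem.Dict.getD_of_not_contains _ _ h

theorem pv_slice_nil (b : Int) : PySem.List.slice ([] : List (List (String × String))) none (some b) = [] := by
  simp [PySem.List.slice]

-- ===== VERDICT (by name: the statement is the Claim_ definition above) =====
theorem select_balanced_items_py_spec : Claim_equal_select_balanced_items_py := by
  intro items yc nc rc _
  unfold Spec_select_balanced_items_py select_balanced_items_py select_balanced_items_py_alt
  dsimp only [List.foldl_cons, List.foldl_nil]
  set d := items.foldl (fun d item =>
        let source_type := pvGetType item
        let d := if d.contains source_type then d else d.insert source_type []
        d.modify source_type [] (fun l => l ++ [item])) (PySem.Dict.empty : PySem.Dict String (List (List (String × String)))) with hd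
  have e : ∀ (t : String) (c : Int) (s : List (List (String × String))),
      (if d.contains t then s ++ PySem.List.slice (d.getD t []) none (some c) else s) =
      s ++ PySem.List.slice (items.filter (fun i => pvGetType i == t)) none (some c) := by
    intro t c s
    by_cases hc : d.contains t
    · rw [if_pos hc, hd, pv_getD_eq_filter]
    · rw [if_neg hc, pv_not_contains_filter items t (by rw [← hd]; simpa using hc), pv_slice_nil,
        List.append_nil]
  rw [e "twitter" 1, e "rss" rc, e "newsletter" nc, e "youtube" yc]
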